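-- pv_equiv track=rewrite | github.com/abdallahdataguy/Excel_BI_Challenges | Excel_Challenge_423_Split_Case_Sensitive_Alphabets_and_Numbers.py | split_case
-- ===== SOURCE A (Python) =====
-- def case(char):
--     if ord(char) in range(97, 123): return 'lower'
--     if ord(char) in range(65, 91): return 'upper'
--     if ord(char) in range(48, 58): return 'digit'
--
-- def split_case(text):
--     chars = ''
--     for i in range(len(text) - 1):
--         if case(text[i]) == case(text[i + 1]):
--             chars += text[i]
--         else:
--             chars += text[i] + ', '
--     return chars + text[-1]
-- ===== SOURCE B (Python) =====
-- def case(char):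
--     if ord(char) in range(97, 123): return 'lower'
--     if ord(char) in range(65, 91): return 'upper'
--     if ord(char) in range(48, 58): return 'digit'
--
-- def split_case(text):
--     n = len(text)
--     cuts = [i for i in range(1, n) if case(text[i - 1]) != case(text[i])]
--     bounds = [0] + cuts + [n]
--     return ', '.join(text[a:b] for a, b in zip(bounds, bounds[1:]))
-- ===== Notes on version B (the rewrite author's own statement) =====
-- stated objective: alternative
-- what changed: Replaces A's single char-by-char scan that interleaves separator insertion into a growing string with a staged computation: first collect the list of boundary indices where the character category changes, then slice the string at those boundaries and join the slices with the comma-space separator.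
import Mathlib
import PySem

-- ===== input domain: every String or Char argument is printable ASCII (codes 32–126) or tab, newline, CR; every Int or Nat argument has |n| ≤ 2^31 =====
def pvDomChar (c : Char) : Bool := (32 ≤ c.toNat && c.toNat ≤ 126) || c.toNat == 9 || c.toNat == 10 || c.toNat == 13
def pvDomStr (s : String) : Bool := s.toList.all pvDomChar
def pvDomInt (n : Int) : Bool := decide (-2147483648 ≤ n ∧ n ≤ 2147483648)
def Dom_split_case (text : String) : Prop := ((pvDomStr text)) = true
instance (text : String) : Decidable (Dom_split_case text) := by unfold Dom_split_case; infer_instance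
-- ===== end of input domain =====

-- B replaces A's interleaved scan-and-append by a staged computation (collect the boundary
-- indices where the category changes, slice the string at them, join the slices with the comma-space separator);
-- alternative decomposition, same asymptotic cost.

-- ===== PORT A =====
-- helper `case`: returns the category name, or none for other characters
def caseOf (c : Char) : Option String :=
  if 97 ≤ c.toNat ∧ c.toNat < 123 then some "lower"
  else if 65 ≤ c.toNat ∧ c.toNat < 91 then some "upper"
  else if 48 ≤ c.toNat ∧ c.toNat < 58 then some "digit"
  else none

def split_case (text : String) : String :=
  let cs := text.toList
  let chars : List Char :=
    (PySem.List.pyRange 0 ((cs.length : Int) - 1) 1).foldl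
      (fun acc i =>
        -- text[i], text[i+1]: i ranges over 0..len-2, so both indices are in range (exact)
        if caseOf (PySem.List.pyGetD cs i ' ') = caseOf (PySem.List.pyGetD cs (i + 1) ' ')
        then acc ++ [PySem.List.pyGetD cs i ' ']
        else acc ++ [PySem.List.pyGetD cs i ' ', ',', ' ']) []
  match PySem.List.pyGet? cs (-1) with    -- text[-1]: IndexError on empty text, excluded by Pre_
  | some c => String.ofList (chars ++ [c])
  | none => String.ofList chars

-- ===== PORT B =====
def split_case_alt (text : String) : String :=
  let cs := text.toList
  let n : Int := cs.length
  -- cuts = [i for i in range(1, n) if case(text[i-1]) != case(text[i])]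
  let cuts : List Int :=
    (PySem.List.pyRange 1 n 1).filter
      (fun i => decide (caseOf (PySem.List.pyGetD cs (i - 1) ' ') ≠ caseOf (PySem.List.pyGetD cs i ' ')))
  -- bounds = [0] + cuts + [n]
  let bounds : List Int := 0 :: cuts ++ [n]
  -- ', '.join(text[a:b] for a, b in zip(bounds, bounds[1:]))
  String.ofList (PySem.Chars.join [',', ' ']
    ((bounds.zip bounds.tail).map (fun ab => PySem.List.slice cs (some ab.1) (some ab.2))))

-- ===== PRECONDITION & SPEC =====
-- Pre_ excludes only the empty string, on which A raises IndexError at text[-1].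
def Pre_split_case (text : String) : Prop := text ≠ ""
instance (text : String) : Decidable (Pre_split_case text) := by unfold Pre_split_case; infer_instance
def pvWitness_split_case : String := "aB3"

def Spec_split_case (text : String) (out : String) : Prop := out = split_case_alt text
instance (text : String) (out : String) : Decidable (Spec_split_case text out) := by unfold Spec_split_case; infer_instance

-- ===== CLAIM (what is proved, stated in full; the proofs are below) =====
def Claim_equal_split_case : Prop := ∀ (text : String), Dom_split_case text → Pre_split_case text → Spec_split_case text (split_case text)

-- ===== LEMMAS AND PROOFS =====

-- A's scan as structural recursion over adjacent pairs
def pairsRec : Char → List Char → List Char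
  | _, [] => []
  | a, b :: t => (if caseOf a = caseOf b then [a] else [a, ',', ' ']) ++ pairsRec b t

-- A's full output after the head character
def tailA : Char → List Char → List Char
  | _, [] => []
  | a, b :: t => (if caseOf a = caseOf b then [b] else [',', ' ', b]) ++ tailA b t

-- B's cut positions (abs index of the second char of each differing adjacent pair),
-- with a at absolute position p
def cutsRec : Char → List Char → Nat → List Nat
  | _, [], _ => []
  | a, b :: t, p => (if caseOf a = caseOf b then [] else [p + 1]) ++ cutsRec b t (p + 1)

-- the chunk list B slices out, as a join over consecutive bound pairs (Nat bounds)
def chunkJoin (cs : List Char) (bs : List Nat) : List Char :=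
  PySem.Chars.join [',', ' '] ((bs.zip bs.tail).map (fun ab => (cs.drop ab.1).take (ab.2 - ab.1)))

lemma rangeA : ∀ (t : List Char) (a : Char) (acc : List Char),
    (List.range t.length).foldl
      (fun acc k =>
        if caseOf ((a :: t).getD k ' ') = caseOf ((a :: t).getD (k+1) ' ')
        then acc ++ [(a :: t).getD k ' '] else acc ++ [(a :: t).getD k ' ', ',', ' ']) acc
    = acc ++ pairsRec a t := by
  intro t
  induction t with
  | nil => intro a acc; simp [pairsRec]
  | cons b t ih =>
    intro a acc
    simp only [List.length_cons, List.range_succ_eq_map, List.foldl_cons, List.foldl_map,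
      List.getD_cons_zero, List.getD_cons_succ]
    have ih' := ih b
    simp only [List.getD_cons_succ] at ih'
    rw [ih']
    simp only [pairsRec]
    by_cases h : caseOf a = caseOf b <;> simp [h]

lemma pairs_last : ∀ (t : List Char) (a : Char),
    pairsRec a t ++ [(a :: t).getLastD ' '] = a :: tailA a t := by
  intro t
  induction t with
  | nil => intro a; simp [pairsRec, tailA]
  | cons b t ih =>
    intro a
    simp only [pairsRec, tailA, List.getLastD_cons]
    have ih' := ih b
    simp only [List.getLastD_cons] at ih'
    rw [List.append_assoc, ih']
    by_cases h : caseOf a = caseOf b <;> simp [h]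

lemma split_case_eq (a : Char) (t : List Char) (text : String) (h : text.toList = a :: t) :
    split_case text = String.ofList (a :: tailA a t) := by
  simp only [split_case]
  rw [h]
  have hlen : ((a :: t).length : Int) - 1 = (t.length : Int) := by simp
  rw [hlen, PySem.List.pyRange_one]
  simp only [Int.sub_zero, Int.toNat_natCast, List.foldl_map]
  have hfold := List.foldl_ext
    (fun (acc : List Char) (k : Nat) =>
      if caseOf (PySem.List.pyGetD (a :: t) (0 + (k : Int)) ' ')
          = caseOf (PySem.List.pyGetD (a :: t) (0 + (k : Int) + 1) ' ')
      then acc ++ [PySem.List.pyGetD (a :: t) (0 + (k : Int)) ' ']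
      else acc ++ [PySem.List.pyGetD (a :: t) (0 + (k : Int)) ' ', ',', ' '])
    (fun (acc : List Char) (k : Nat) =>
      if caseOf ((a :: t).getD k ' ') = caseOf ((a :: t).getD (k + 1) ' ')
      then acc ++ [(a :: t).getD k ' '] else acc ++ [(a :: t).getD k ' ', ',', ' '])
    ([] : List Char) (l := List.range t.length)
    (by
      intro acc k _
      have h2 : (0 : Int) + (k : Int) + 1 = ((k + 1 : Nat) : Int) := by push_cast; ring
      have h1 : (0 : Int) + (k : Int) = ((k : Nat) : Int) := by omega
      simp only [h2]
      simp only [h1]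
      simp only [PySem.List.pyGetD_natCast])
  rw [hfold, rangeA t a [], PySem.List.pyGet?_neg_one]
  have hl : (a :: t).getLast? = some ((a :: t).getLastD ' ') := by
    rw [List.getLastD_eq_getLast?]
    cases hx : (a :: t).getLast? with
    | none => simp at hx
    | some y => rfl
  rw [hl]
  simp only [List.nil_append]
  rw [pairs_last t a]

-- the filtered index range equals the recursive cut list (k ranges over adjacent-pair indices)
lemma cuts_filter : ∀ (t : List Char) (a : Char) (p : Nat),
    ((List.range t.length).filter
      (fun k => decide (caseOf ((a :: t).getD k ' ') ≠ caseOf ((a :: t).getD (k + 1) ' ')))).map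
        (fun k => p + k + 1)
    = cutsRec a t p := by
  intro t
  induction t with
  | nil => intro a p; simp [cutsRec]
  | cons b t ih =>
    intro a p
    have htail : ((List.range t.length).filter
        (fun k => decide (caseOf ((b :: t).getD k ' ') ≠ caseOf ((b :: t).getD (k + 1) ' ')))).map
          ((fun k => p + k + 1) ∘ Nat.succ) = cutsRec b t (p + 1) := by
      rw [← ih b (p + 1)]
      congr 1
      funext k
      simp [Function.comp]
      omega
    have hpred2 : ((fun k => decide ¬caseOf ((a :: b :: t).getD k ' ') = caseOf ((b :: t).getD k ' ')) ∘ Nat.succ)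
        = (fun k => decide (caseOf ((b :: t).getD k ' ') ≠ caseOf ((b :: t).getD (k + 1) ' '))) := by
      funext k
      simp [Function.comp]
    simp only [List.length_cons, List.range_succ_eq_map, List.filter_cons, List.filter_map,
      List.getD_cons_zero, List.getD_cons_succ]
    by_cases h : caseOf a = caseOf b <;>
      simp only [h, ne_eq, not_true_eq_false, decide_false, Bool.false_eq_true, if_false,
        not_false_eq_true, decide_true, if_true, List.map_cons, List.map_map, cutsRec,
        List.nil_append, List.singleton_append, Nat.add_zero] <;>
      rw [hpred2, htail]

-- peeling one chunk off a bounds list with at least three entries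
lemma chunkJoin_cons (cs : List Char) (x y : Nat) (bs : List Nat) (h : bs ≠ []) :
    chunkJoin cs (x :: y :: bs)
    = (cs.drop x).take (y - x) ++ [',', ' '] ++ chunkJoin cs (y :: bs) := by
  obtain ⟨z, zs, rfl⟩ := List.exists_cons_of_ne_nil h
  simp only [chunkJoin, List.zip_cons_cons, List.tail_cons, List.map_cons]
  rw [PySem.Chars.join_cons_cons]

-- joining the slices at the cut bounds rebuilds the run-separated string
-- (cs = u ++ a :: t; the open chunk began at position s ≤ u.length; a sits at u.length)
lemma chunkJoin_eq : ∀ (t : List Char) (a : Char) (u : List Char) (s : Nat), s ≤ u.length →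
    chunkJoin (u ++ a :: t) (s :: cutsRec a t u.length ++ [(u ++ a :: t).length])
    = u.drop s ++ a :: tailA a t := by
  intro t
  induction t with
  | nil =>
    intro a u s hs
    show chunkJoin (u ++ [a]) (s :: [] ++ [(u ++ [a]).length]) = u.drop s ++ a :: tailA a []
    simp only [chunkJoin, List.nil_append, List.cons_append, List.zip_cons_cons,
      List.tail_cons, List.zip_nil_right, List.map_cons, List.map_nil, tailA]
    rw [PySem.Chars.join_singleton]
    rw [List.drop_append_of_le_length hs]
    have hl : (u ++ [a]).length - s = (u.drop s).length + 1 := by simp; omega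
    rw [hl, List.take_append]
    simp
  | cons b t ih =>
    intro a u s hs
    by_cases h : caseOf a = caseOf b
    · have hIH := ih b (u ++ [a]) s (by simp; omega)
      have harr : (u ++ [a]).length = u.length + 1 := by simp
      rw [harr, List.append_assoc] at hIH
      simp only [List.singleton_append] at hIH
      show chunkJoin (u ++ a :: b :: t)
          (s :: cutsRec a (b :: t) u.length ++ [(u ++ a :: b :: t).length]) = _
      simp only [cutsRec, h, if_true, List.nil_append]
      rw [hIH, List.drop_append_of_le_length hs]
      simp [tailA, h]
    · have hIH := ih b (u ++ [a]) (u.length + 1) (by simp)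
      have harr : (u ++ [a]).length = u.length + 1 := by simp
      rw [harr, List.append_assoc] at hIH
      simp only [List.singleton_append] at hIH
      show chunkJoin (u ++ a :: b :: t)
          (s :: cutsRec a (b :: t) u.length ++ [(u ++ a :: b :: t).length]) = _
      simp only [cutsRec, h, if_false, List.cons_append]
      rw [chunkJoin_cons _ _ _ _ (by simp)]
      simp only [List.nil_append]
      simp only [List.cons_append] at hIH
      rw [hIH]
      have hnil : List.drop (u.length + 1) (u ++ [a]) = ([] : List Char) := by
        have hl : (u ++ [a]).length = u.length + 1 := by simp
        rw [← hl, List.drop_length]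
      rw [hnil, List.drop_append_of_le_length hs]
      have hchunk : ((u.drop s) ++ a :: b :: t).take (u.length + 1 - s) = u.drop s ++ [a] := by
        have h2 : u.length + 1 - s = (u.drop s).length + 1 := by simp; omega
        rw [h2, List.take_append]
        simp
      rw [hchunk]
      simp [tailA, h]

lemma zip_tail_map (c : Nat → Int) : ∀ (l : List Nat),
    (l.map c).zip ((l.map c).tail) = (l.zip l.tail).map (fun ab => (c ab.1, c ab.2)) := by
  intro l
  induction l with
  | nil => rfl
  | cons x xs ih =>
    cases xs with
    | nil => rfl
    | cons y ys =>
      simp only [List.map_cons, List.tail_cons, List.zip_cons_cons] at ih ⊢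
      rw [ih]

lemma split_case_alt_eq (a : Char) (t : List Char) (text : String) (h : text.toList = a :: t) :
    split_case_alt text = String.ofList (a :: tailA a t) := by
  have hchunk := chunkJoin_eq t a [] 0 (by simp)
  simp only [List.nil_append, List.length_nil, List.drop_nil] at hchunk
  simp only [split_case_alt]
  rw [h]
  have hpred : ((fun i => decide (caseOf (PySem.List.pyGetD (a :: t) (i - 1) ' ')
        ≠ caseOf (PySem.List.pyGetD (a :: t) i ' '))) ∘ (fun k : Nat => (1 : Int) + k))
      = (fun k => decide (caseOf ((a :: t).getD k ' ') ≠ caseOf ((a :: t).getD (k + 1) ' '))) := by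
    funext k
    have h1 : (1 : Int) + (k : Int) - 1 = ((k : Nat) : Int) := by omega
    have h2 : (1 : Int) + (k : Int) = (((k + 1 : Nat)) : Int) := by push_cast; ring
    have h3 : (((k + 1 : Nat)) : Int) - 1 = ((k : Nat) : Int) := by push_cast; ring
    simp only [Function.comp, h2, h3, PySem.List.pyGetD_natCast]
  have hcuts : (PySem.List.pyRange 1 ((a :: t).length : Int) 1).filter
      (fun i => decide (caseOf (PySem.List.pyGetD (a :: t) (i - 1) ' ')
        ≠ caseOf (PySem.List.pyGetD (a :: t) i ' ')))
      = (cutsRec a t 0).map (Nat.cast : Nat → Int) := by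
    rw [PySem.List.pyRange_one]
    have hn : ((((a :: t).length : Int)) - 1).toNat = t.length := by simp
    rw [hn, List.filter_map, hpred, ← cuts_filter t a 0, List.map_map]
    congr 1
    funext k
    simp only [Function.comp]
    push_cast
    ring
  rw [hcuts]
  congr 1
  rw [← hchunk, chunkJoin]
  have hbounds : (0 : Int) :: ((cutsRec a t 0).map (Nat.cast : Nat → Int)) ++ [((a :: t).length : Int)]
      = ((0 :: cutsRec a t 0 ++ [(a :: t).length]).map (Nat.cast : Nat → Int)) := by
    simp
  rw [hbounds]
  generalize (0 :: cutsRec a t 0 ++ [(a :: t).length]) = bsN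
  rw [zip_tail_map, List.map_map]
  refine congrArg (PySem.Chars.join [',', ' ']) ?_
  refine List.map_congr_left (fun ab _ => ?_)
  simp only [Function.comp]
  rw [PySem.List.slice_natCast]

-- ===== VERDICT (by name: the statement is the Claim_ definition above) =====
theorem split_case_spec : Claim_equal_split_case := by
  intro text _ hpre
  unfold Spec_split_case
  cases h : text.toList with
  | nil =>
    have he : text = "" := by
      have := congrArg String.ofList h
      rwa [String.ofList_toList] at this
    exact absurd he hpre
  | cons a t =>
    rw [split_case_eq a t text h, split_case_alt_eq a t text h]
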